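-- pv_equiv track=rewrite | github.com/7dpk/Phylogenetic-tree | prettyprint.py | _adjust_left
-- ===== SOURCE A (Python) =====
-- def _adjust_left(L, i, n):
--     if i == n:
--         return []
--     else:
--         if i <= n//2:
--             adj = ' '
--         else:
--             adj = '|'
--
--         return [adj + L[i]] + _adjust_left(L, i+1, n)
-- ===== SOURCE B (Python) =====
-- def _adjust_left(L, i, n):
--     # iterative accumulator loop instead of recursion
--     result = []
--     half = n // 2
--     for j in range(i, n):
--         adj = ' ' if j <= half else '|'
--         result.append(adj + L[j])
--     return result
-- ===== Notes on version B (the rewrite author's own statement) =====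
-- stated objective: simpler
-- what changed: Replaces the list-concatenating recursion with a single iterative loop over range(i, n) that appends into one accumulator list.
import Mathlib
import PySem

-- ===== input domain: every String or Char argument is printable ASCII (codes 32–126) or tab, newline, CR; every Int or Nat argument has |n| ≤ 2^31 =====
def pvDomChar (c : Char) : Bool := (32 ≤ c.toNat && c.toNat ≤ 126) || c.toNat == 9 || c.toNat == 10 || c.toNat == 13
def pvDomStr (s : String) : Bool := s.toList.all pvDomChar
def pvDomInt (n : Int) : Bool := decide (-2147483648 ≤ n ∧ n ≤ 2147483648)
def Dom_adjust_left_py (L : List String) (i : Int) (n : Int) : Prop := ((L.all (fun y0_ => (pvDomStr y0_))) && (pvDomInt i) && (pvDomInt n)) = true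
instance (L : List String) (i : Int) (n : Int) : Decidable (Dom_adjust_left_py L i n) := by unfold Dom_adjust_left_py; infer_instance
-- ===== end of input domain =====

-- B replaces A's recursion (which rebuilds the tail list at every level) by one iterative
-- accumulator loop over range(i, n); equivalence of the RETURN value is proved on Pre_.

-- ===== PORT A =====
-- literal port of A's recursion; the fuel (n - i).toNat only makes the recursion well-founded
-- (inside Pre_ the recursion stops exactly at i = n, as in Python).
def adjALoop (L : List String) (n : Int) : Nat → Int → List String
  | 0, _ => []
  | Nat.succ k, i =>
    if i = n then []
    else
      let adj := if i ≤ PySem.Int.floordiv n 2 then " " else "|"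
      [adj ++ PySem.List.pyGetD L i ""] ++ adjALoop L n k (i + 1)

def adjust_left_py (L : List String) (i : Int) (n : Int) : List String :=
  adjALoop L n (n - i).toNat i

-- ===== PORT B =====
def adjust_left_py_alt (L : List String) (i : Int) (n : Int) : List String :=
  (PySem.List.pyRange i n 1).foldl
    (fun result j =>
      result ++ [(if j ≤ PySem.Int.floordiv n 2 then " " else "|") ++ PySem.List.pyGetD L j ""])
    []

-- ===== PRECONDITION & SPEC =====
-- Pre_ excludes exactly the inputs where Python A does not return: i > n (infinite recursion)
-- and indices in [i, n) outside Python's index range for L (IndexError).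
def Pre_adjust_left_py (L : List String) (i : Int) (n : Int) : Prop :=
  i ≤ n ∧ (i = n ∨ (-(L.length : Int) ≤ i ∧ n ≤ (L.length : Int)))
instance (L : List String) (i : Int) (n : Int) : Decidable (Pre_adjust_left_py L i n) := by
  unfold Pre_adjust_left_py; infer_instance

def pvWitness_adjust_left_py : List String × Int × Int := (["a", "b", "c"], 0, 3)

def Spec_adjust_left_py (L : List String) (i : Int) (n : Int) (out : List String) : Prop :=
  out = adjust_left_py_alt L i n
instance (L : List String) (i : Int) (n : Int) (out : List String) :
    Decidable (Spec_adjust_left_py L i n out) := by unfold Spec_adjust_left_py; infer_instance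

-- ===== CLAIM (what is proved, stated in full; the proofs are below) =====
def Claim_equal_adjust_left_py : Prop :=
  ∀ (L : List String) (i : Int) (n : Int), Dom_adjust_left_py L i n →
    Pre_adjust_left_py L i n → Spec_adjust_left_py L i n (adjust_left_py L i n)

-- ===== LEMMAS AND PROOFS =====
-- the common closed description of both ports
def adjEntry (L : List String) (n : Int) (j : Int) : String :=
  (if j ≤ PySem.Int.floordiv n 2 then " " else "|") ++ PySem.List.pyGetD L j ""

lemma adjALoop_eq_map (L : List String) (n : Int) :
    ∀ (k : Nat) (i : Int), (n - i).toNat = k →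
      adjALoop L n k i = (PySem.List.pyRange i n 1).map (adjEntry L n) := by
  intro k
  induction k with
  | zero =>
    intro i hk
    have hni : n ≤ i := by omega
    rw [PySem.List.pyRange_one_eq_nil hni]
    rfl
  | succ k ih =>
    intro i hk
    by_cases hin : i = n
    · rw [adjALoop, if_pos hin, hin, PySem.List.pyRange_one_eq_nil le_rfl]; rfl
    · have hlt : i < n := by omega
      rw [adjALoop, if_neg hin, PySem.List.pyRange_one_cons hlt, List.map_cons,
        ih (i + 1) (by omega)]
      rfl

lemma alt_eq_map (L : List String) (i n : Int) :
    adjust_left_py_alt L i n = (PySem.List.pyRange i n 1).map (adjEntry L n) := by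
  unfold adjust_left_py_alt
  rw [PySem.List.foldl_append_singleton_eq_map]
  rfl

-- ===== VERDICT (by name: the statement is the Claim_ definition above) =====
theorem adjust_left_py_spec : Claim_equal_adjust_left_py := by
  intro L i n _ _
  unfold Spec_adjust_left_py adjust_left_py
  rw [adjALoop_eq_map L n _ i rfl, alt_eq_map]
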